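-- pv_equiv track=rewrite | github.com/daniel-reich/ubiquitous-fiesta | 5ZDz5nDDPdfg5BH8K_23.py | only_5_and_3
-- ===== SOURCE A (Python) =====
-- def only_5_and_3(n):
--   if n % 5 == 0:
--     return True
--   t = 3
--   while t <= n:
--     if (n - t) % 5 == 0:
--       return True
--     t *= 3
--   return False
-- ===== SOURCE B (Python) =====
-- def only_5_and_3(n):
--     # Powers of 3 mod 5 cycle through 3, 4, 2, 1; the smallest power of 3
--     # hitting each nonzero residue mod 5 is the threshold n must reach.
--     r = n % 5
--     if r == 0:
--         return True
--     smallest_power = {3: 3, 4: 9, 2: 27, 1: 81}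
--     return n >= smallest_power[r]
-- ===== Notes on version B (the rewrite author's own statement) =====
-- stated objective: alternative
-- what changed: Replaced the loop over successive powers of three with a constant-size table mapping each nonzero residue of n mod five to the smallest power of three with that residue, followed by a single comparison of n against that threshold.
import Mathlib
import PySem

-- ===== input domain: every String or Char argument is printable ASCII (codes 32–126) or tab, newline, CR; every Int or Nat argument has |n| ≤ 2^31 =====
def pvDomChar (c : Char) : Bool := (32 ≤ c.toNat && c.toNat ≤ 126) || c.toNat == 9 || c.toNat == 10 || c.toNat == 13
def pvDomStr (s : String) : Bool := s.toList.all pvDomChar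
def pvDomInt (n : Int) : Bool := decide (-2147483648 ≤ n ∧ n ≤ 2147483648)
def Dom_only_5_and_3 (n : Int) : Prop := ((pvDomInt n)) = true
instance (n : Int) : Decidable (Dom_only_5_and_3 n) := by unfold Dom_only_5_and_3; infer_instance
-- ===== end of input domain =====

-- B replaces A's loop over successive powers of three with a single residue-table lookup (alternative algorithm).

-- ===== PORT A =====
-- while t <= n: if (n - t) % 5 == 0: return True; t *= 3
def loopA (n t : Int) (ht : 0 < t) : Bool :=
  if h : t ≤ n then
    if PySem.Int.mod (n - t) 5 == 0 then true
    else loopA n (t * 3) (by omega)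
  else false
termination_by (n + 1 - t).toNat
decreasing_by omega

def only_5_and_3 (n : Int) : Bool :=
  if PySem.Int.mod n 5 == 0 then true
  else loopA n 3 (by norm_num)

-- ===== PORT B =====
def only_5_and_3_alt (n : Int) : Bool :=
  let r := PySem.Int.mod n 5
  if r == 0 then true
  else
    let smallest_power : PySem.Dict Int Int :=
      PySem.Dict.ofList [(3, 3), (4, 9), (2, 27), (1, 81)]
    match PySem.Dict.get? smallest_power r with
    | some t => decide (t ≤ n)     -- n >= smallest_power[r]
    | none => false                -- unreachable: r ∈ {1,2,3,4} here, all keys present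

-- ===== PRECONDITION & SPEC =====
def Spec_only_5_and_3 (n : Int) (out : Bool) : Prop := out = only_5_and_3_alt n
instance (n : Int) (out : Bool) : Decidable (Spec_only_5_and_3 n out) := by unfold Spec_only_5_and_3; infer_instance

-- ===== CLAIM (what is proved, stated in full; the proofs are below) =====
def Claim_equal_only_5_and_3 : Prop := ∀ (n : Int), Dom_only_5_and_3 n → Spec_only_5_and_3 n (only_5_and_3 n)

-- ===== LEMMAS AND PROOFS =====

theorem pv_mod5 (n : Int) : PySem.Int.mod n 5 = n % 5 :=
  PySem.Int.mod_eq_emod_of_pos (by norm_num)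

theorem loopA_stop (n t : Int) (ht : 0 < t) (h : n < t) : loopA n t ht = false := by
  rw [loopA]; simp [not_le.mpr h]

theorem loopA_step (n t u : Int) (ht : 0 < t) (hu : 0 < u) (h : t ≤ n) (htu : u = t * 3) :
    loopA n t ht = (if PySem.Int.mod (n - t) 5 == 0 then true else loopA n u hu) := by
  subst htu; rw [loopA]; simp [h]

theorem loop_r3 (n : Int) (hr : n % 5 = 3) (ht : (0:Int) < 3) :
    loopA n 3 ht = decide (3 ≤ n) := by
  by_cases h3 : 3 ≤ n
  · rw [loopA_step n 3 9 ht (by norm_num) h3 (by norm_num)]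
    have e3 : PySem.Int.mod (n - 3) 5 = 0 := by rw [pv_mod5]; omega
    rw [e3]; simp [h3]
  · rw [loopA_stop n 3 ht (by omega)]; simp [h3]

theorem loop_r4 (n : Int) (hr : n % 5 = 4) (ht : (0:Int) < 3) :
    loopA n 3 ht = decide (9 ≤ n) := by
  by_cases h3 : 3 ≤ n
  · rw [loopA_step n 3 9 ht (by norm_num) h3 (by norm_num)]
    have e3 : PySem.Int.mod (n - 3) 5 = 1 := by rw [pv_mod5]; omega
    rw [e3]
    by_cases h9 : 9 ≤ n
    · rw [loopA_step n 9 27 (by norm_num) (by norm_num) h9 (by norm_num)]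
      have e9 : PySem.Int.mod (n - 9) 5 = 0 := by rw [pv_mod5]; omega
      rw [e9]; simp [h9]
    · rw [loopA_stop n 9 (by norm_num) (by omega)]; simp [h9]
  · rw [loopA_stop n 3 ht (by omega)]; simp; omega

theorem loop_r2 (n : Int) (hr : n % 5 = 2) (ht : (0:Int) < 3) :
    loopA n 3 ht = decide (27 ≤ n) := by
  by_cases h3 : 3 ≤ n
  · rw [loopA_step n 3 9 ht (by norm_num) h3 (by norm_num)]
    have e3 : PySem.Int.mod (n - 3) 5 = 4 := by rw [pv_mod5]; omega
    rw [e3]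
    by_cases h9 : 9 ≤ n
    · rw [loopA_step n 9 27 (by norm_num) (by norm_num) h9 (by norm_num)]
      have e9 : PySem.Int.mod (n - 9) 5 = 3 := by rw [pv_mod5]; omega
      rw [e9]
      by_cases h27 : 27 ≤ n
      · rw [loopA_step n 27 81 (by norm_num) (by norm_num) h27 (by norm_num)]
        have e27 : PySem.Int.mod (n - 27) 5 = 0 := by rw [pv_mod5]; omega
        rw [e27]; simp [h27]
      · rw [loopA_stop n 27 (by norm_num) (by omega)]; simp [h27]
    · rw [loopA_stop n 9 (by norm_num) (by omega)]; simp; omega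
  · rw [loopA_stop n 3 ht (by omega)]; simp; omega

theorem loop_r1 (n : Int) (hr : n % 5 = 1) (ht : (0:Int) < 3) :
    loopA n 3 ht = decide (81 ≤ n) := by
  by_cases h3 : 3 ≤ n
  · rw [loopA_step n 3 9 ht (by norm_num) h3 (by norm_num)]
    have e3 : PySem.Int.mod (n - 3) 5 = 3 := by rw [pv_mod5]; omega
    rw [e3]
    by_cases h9 : 9 ≤ n
    · rw [loopA_step n 9 27 (by norm_num) (by norm_num) h9 (by norm_num)]
      have e9 : PySem.Int.mod (n - 9) 5 = 2 := by rw [pv_mod5]; omega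
      rw [e9]
      by_cases h27 : 27 ≤ n
      · rw [loopA_step n 27 81 (by norm_num) (by norm_num) h27 (by norm_num)]
        have e27 : PySem.Int.mod (n - 27) 5 = 4 := by rw [pv_mod5]; omega
        rw [e27]
        by_cases h81 : 81 ≤ n
        · rw [loopA_step n 81 243 (by norm_num) (by norm_num) h81 (by norm_num)]
          have e81 : PySem.Int.mod (n - 81) 5 = 0 := by rw [pv_mod5]; omega
          rw [e81]; simp [h81]
        · rw [loopA_stop n 81 (by norm_num) (by omega)]; simp [h81]
      · rw [loopA_stop n 27 (by norm_num) (by omega)]; simp; omega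
    · rw [loopA_stop n 9 (by norm_num) (by omega)]; simp; omega
  · rw [loopA_stop n 3 ht (by omega)]; simp; omega

theorem alt_r0 (n : Int) (hr : n % 5 = 0) : only_5_and_3_alt n = true := by
  unfold only_5_and_3_alt; simp [hr]

theorem alt_r1 (n : Int) (hr : n % 5 = 1) : only_5_and_3_alt n = decide (81 ≤ n) := by
  have hg : PySem.Dict.get? (PySem.Dict.ofList [((3:Int), (3:Int)), (4, 9), (2, 27), (1, 81)]) 1 = some 81 := by decide
  unfold only_5_and_3_alt; simp [hr, hg]

theorem alt_r2 (n : Int) (hr : n % 5 = 2) : only_5_and_3_alt n = decide (27 ≤ n) := by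
  have hg : PySem.Dict.get? (PySem.Dict.ofList [((3:Int), (3:Int)), (4, 9), (2, 27), (1, 81)]) 2 = some 27 := by decide
  unfold only_5_and_3_alt; simp [hr, hg]

theorem alt_r3 (n : Int) (hr : n % 5 = 3) : only_5_and_3_alt n = decide (3 ≤ n) := by
  have hg : PySem.Dict.get? (PySem.Dict.ofList [((3:Int), (3:Int)), (4, 9), (2, 27), (1, 81)]) 3 = some 3 := by decide
  unfold only_5_and_3_alt; simp [hr, hg]

theorem alt_r4 (n : Int) (hr : n % 5 = 4) : only_5_and_3_alt n = decide (9 ≤ n) := by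
  have hg : PySem.Dict.get? (PySem.Dict.ofList [((3:Int), (3:Int)), (4, 9), (2, 27), (1, 81)]) 4 = some 9 := by decide
  unfold only_5_and_3_alt; simp [hr, hg]

-- ===== VERDICT (by name: the statement is the Claim_ definition above) =====
theorem only_5_and_3_spec : Claim_equal_only_5_and_3 := by
  intro n _
  unfold Spec_only_5_and_3 only_5_and_3
  have h5 : n % 5 = 0 ∨ n % 5 = 1 ∨ n % 5 = 2 ∨ n % 5 = 3 ∨ n % 5 = 4 := by omega
  rcases h5 with hr | hr | hr | hr | hr
  · rw [alt_r0 n hr]; simp [hr]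
  · rw [alt_r1 n hr, pv_mod5, hr]; simpa using loop_r1 n hr (by norm_num)
  · rw [alt_r2 n hr, pv_mod5, hr]; simpa using loop_r2 n hr (by norm_num)
  · rw [alt_r3 n hr, pv_mod5, hr]; simpa using loop_r3 n hr (by norm_num)
  · rw [alt_r4 n hr, pv_mod5, hr]; simpa using loop_r4 n hr (by norm_num)
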